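-- pv_equiv track=rewrite | github.com/danielroe/brainlife-ezbids | handler/ezBIDS_core/ezBIDS_core.py | determine_direction
-- ===== SOURCE A (Python) =====
-- def determine_direction(pe_direction, ornt):
--     """
--     Takes [corrected] pe_direction and image orientation to determine "_dir-" entity label,
--     which is required or highly recommended for specific acquisitions.
--
--     Based on https://github.com/nipreps/fmriprep/issues/2341 and code derived
--     from Chris Markiewicz and Mathias Goncalves.
--
--     Parameters
--     ----------
--     pe_direction : string
--         Value from PhaseEncodingDirection in acquisition json file generated
--         by dcm2niix
--     ornt: string
--         Value of "".join(nib.aff2axcodes(nii_img.affine)), where "nii_img" is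
--         is the acquisition NIFTI file generated by dcm2niix
--
--     Returns
--     -------
--     direction: string
--         direction for BIDS "_dir-" entity label
--     """
--     axes = (("R", "L"), ("A", "P"), ("S", "I"))
--     ax_idcs = {"i": 0, "j": 1, "k": 2}
--     axcode = ornt[ax_idcs[pe_direction[0]]]
--     inv = pe_direction[1:] == "-"
--
--     if pe_direction[0] == "i":
--         if "L" in axcode:
--             inv = not inv
--     elif pe_direction[0] == "j":
--         if "P" in axcode:
--             inv = not inv
--     elif pe_direction[0] == "k":
--         if "I" in axcode:
--             inv = not inv
--
--     for ax in axes: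
--         for flip in (ax, ax[::-1]):
--             if flip[not inv].startswith(axcode):
--                 direction = "".join(flip)
--
--     return direction
-- ===== SOURCE B (Python) =====
-- _IDX = {"i": 0, "j": 1, "k": 2}
--
-- # Complete precomputed answer table: (axis letter, sign is "-", orientation letter) -> label.
-- _TABLE = {
--     ("i", False, "R"): "LR", ("i", False, "L"): "LR", ("i", False, "A"): "PA",
--     ("i", False, "P"): "AP", ("i", False, "S"): "IS", ("i", False, "I"): "SI",
--     ("i", True, "R"): "RL", ("i", True, "L"): "RL", ("i", True, "A"): "AP",
--     ("i", True, "P"): "PA", ("i", True, "S"): "SI", ("i", True, "I"): "IS",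
--     ("j", False, "R"): "LR", ("j", False, "L"): "RL", ("j", False, "A"): "PA",
--     ("j", False, "P"): "PA", ("j", False, "S"): "IS", ("j", False, "I"): "SI",
--     ("j", True, "R"): "RL", ("j", True, "L"): "LR", ("j", True, "A"): "AP",
--     ("j", True, "P"): "AP", ("j", True, "S"): "SI", ("j", True, "I"): "IS",
--     ("k", False, "R"): "LR", ("k", False, "L"): "RL", ("k", False, "A"): "PA",
--     ("k", False, "P"): "AP", ("k", False, "S"): "IS", ("k", False, "I"): "IS",
--     ("k", True, "R"): "RL", ("k", True, "L"): "LR", ("k", True, "A"): "AP",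
--     ("k", True, "P"): "PA", ("k", True, "S"): "SI", ("k", True, "I"): "SI",
-- }
--
--
-- def determine_direction(pe_direction, ornt):
--     """One lookup in a precomputed 36-entry table; no inversion logic at runtime."""
--     return _TABLE[(pe_direction[0], pe_direction[1:] == "-", ornt[_IDX[pe_direction[0]]])]
-- ===== Notes on version B (the rewrite author's own statement) =====
-- stated objective: alternative
-- what changed: Replaces A's runtime inversion logic (if/elif flip chain plus nested generate-and-test over axis pairs) by a single lookup in a precomputed 36-entry table keyed by (axis letter, sign, orientation letter).
import Mathlib
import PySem

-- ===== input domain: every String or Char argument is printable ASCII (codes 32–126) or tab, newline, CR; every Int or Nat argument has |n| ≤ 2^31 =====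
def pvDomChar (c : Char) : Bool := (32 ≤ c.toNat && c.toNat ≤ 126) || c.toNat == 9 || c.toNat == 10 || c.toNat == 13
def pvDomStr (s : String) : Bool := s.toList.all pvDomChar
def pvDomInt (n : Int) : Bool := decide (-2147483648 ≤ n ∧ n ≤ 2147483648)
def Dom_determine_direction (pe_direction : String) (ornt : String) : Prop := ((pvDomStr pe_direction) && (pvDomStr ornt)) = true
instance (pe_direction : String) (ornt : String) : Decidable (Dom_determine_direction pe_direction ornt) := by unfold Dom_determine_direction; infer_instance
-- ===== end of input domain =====

-- B replaces A's runtime inversion logic and generate-and-test loop by a single lookup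
-- in a precomputed 36-entry table (objective: alternative).

-- ===== PORT A =====
def determine_direction (pe_direction : String) (ornt : String) : String :=
  let axes : List (String × String) := [("R","L"),("A","P"),("S","I")]
  let ax_idcs : PySem.Dict String Int := PySem.Dict.ofList [("i",0),("j",1),("k",2)]
  -- pe_direction[0]: IndexError on empty pe_direction is excluded by Pre_
  let c0 := PySem.List.pyGetD pe_direction.toList 0 ' '
  -- ax_idcs[...]: KeyError on a first char outside i/j/k is excluded by Pre_
  let idx := ax_idcs.getD (String.ofList [c0]) 0
  -- ornt[idx]: IndexError on a too-short ornt is excluded by Pre_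
  let axcode := String.ofList [PySem.List.pyGetD ornt.toList idx ' ']
  let inv0 := PySem.Str.slice pe_direction (some 1) none == "-"
  let inv :=
    if String.ofList [c0] == "i" then (if PySem.Str.isIn "L" axcode then !inv0 else inv0)
    else if String.ofList [c0] == "j" then (if PySem.Str.isIn "P" axcode then !inv0 else inv0)
    else if String.ofList [c0] == "k" then (if PySem.Str.isIn "I" axcode then !inv0 else inv0)
    else inv0
  let direction : Option String :=
    axes.foldl (fun acc ax =>
      [ax, (ax.2, ax.1)].foldl (fun acc flip =>
        if PySem.Str.startswith (if inv then flip.1 else flip.2) axcode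
        then some (PySem.Str.join "" [flip.1, flip.2]) else acc) acc) none
  -- UnboundLocalError when no flip matched is excluded by Pre_
  direction.getD ""

-- ===== PORT B =====
-- the module-level table literal of Source B
def pvTable : PySem.Dict (String × Bool × String) String :=
  PySem.Dict.ofList
    [(("i", false, "R"), "LR"),
     (("i", false, "L"), "LR"),
     (("i", false, "A"), "PA"),
     (("i", false, "P"), "AP"),
     (("i", false, "S"), "IS"),
     (("i", false, "I"), "SI"),
     (("i", true, "R"), "RL"),
     (("i", true, "L"), "RL"),
     (("i", true, "A"), "AP"),
     (("i", true, "P"), "PA"),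
     (("i", true, "S"), "SI"),
     (("i", true, "I"), "IS"),
     (("j", false, "R"), "LR"),
     (("j", false, "L"), "RL"),
     (("j", false, "A"), "PA"),
     (("j", false, "P"), "PA"),
     (("j", false, "S"), "IS"),
     (("j", false, "I"), "SI"),
     (("j", true, "R"), "RL"),
     (("j", true, "L"), "LR"),
     (("j", true, "A"), "AP"),
     (("j", true, "P"), "AP"),
     (("j", true, "S"), "SI"),
     (("j", true, "I"), "IS"),
     (("k", false, "R"), "LR"),
     (("k", false, "L"), "RL"),
     (("k", false, "A"), "PA"),
     (("k", false, "P"), "AP"),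
     (("k", false, "S"), "IS"),
     (("k", false, "I"), "IS"),
     (("k", true, "R"), "RL"),
     (("k", true, "L"), "LR"),
     (("k", true, "A"), "AP"),
     (("k", true, "P"), "PA"),
     (("k", true, "S"), "SI"),
     (("k", true, "I"), "SI")]

def pvIdx : PySem.Dict String Int := PySem.Dict.ofList [("i",0),("j",1),("k",2)]

def determine_direction_alt (pe_direction : String) (ornt : String) : String :=
  -- pe_direction[0]: IndexError excluded by Pre_
  let c0 := String.ofList [PySem.List.pyGetD pe_direction.toList 0 ' ']
  -- _IDX[c0]: KeyError excluded by Pre_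
  let idx := pvIdx.getD c0 0
  -- ornt[idx]: IndexError excluded by Pre_
  let axcode := String.ofList [PySem.List.pyGetD ornt.toList idx ' ']
  -- _TABLE[...]: KeyError (key not in the 36-entry table) excluded by Pre_
  pvTable.getD (c0, PySem.Str.slice pe_direction (some 1) none == "-", axcode) ""

-- ===== PRECONDITION & SPEC =====
-- Pre_ excludes exactly the inputs where A raises: empty pe_direction (IndexError),
-- a first char outside i/j/k (KeyError), ornt too short (IndexError), or an ornt
-- letter outside R/L/A/P/S/I (UnboundLocalError).
def pvAxIdx (c : Char) : Nat := if c = 'i' then 0 else if c = 'j' then 1 else 2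
def Pre_determine_direction (pe_direction : String) (ornt : String) : Prop :=
  pe_direction.toList ≠ [] ∧
  pe_direction.toList.headD ' ' ∈ (['i','j','k'] : List Char) ∧
  pvAxIdx (pe_direction.toList.headD ' ') < ornt.toList.length ∧
  ornt.toList.getD (pvAxIdx (pe_direction.toList.headD ' ')) ' ' ∈ (['R','L','A','P','S','I'] : List Char)
instance (pe_direction : String) (ornt : String) : Decidable (Pre_determine_direction pe_direction ornt) := by
  unfold Pre_determine_direction; infer_instance

def pvWitness_determine_direction : String × String := ("j-", "RAS")

def Spec_determine_direction (pe_direction : String) (ornt : String) (out : String) : Prop := out = determine_direction_alt pe_direction ornt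
instance (pe_direction : String) (ornt : String) (out : String) : Decidable (Spec_determine_direction pe_direction ornt out) := by unfold Spec_determine_direction; infer_instance

-- ===== CLAIM (what is proved, stated in full; the proofs are below) =====
def Claim_equal_determine_direction : Prop := ∀ (pe_direction : String) (ornt : String), Dom_determine_direction pe_direction ornt → Pre_determine_direction pe_direction ornt → Spec_determine_direction pe_direction ornt (determine_direction pe_direction ornt)

-- ===== LEMMAS AND PROOFS =====

lemma pv_getD0 (l : List Char) : PySem.List.pyGetD l (0:Int) ' ' = l[0]?.getD ' ' := by
  simp only [PySem.List.pyGetD, PySem.List.pyGet?, PySem.List.pyIdx?]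
  split_ifs <;> simp_all

lemma pv_getD1 (l : List Char) : PySem.List.pyGetD l (1:Int) ' ' = l[1]?.getD ' ' := by
  simp only [PySem.List.pyGetD, PySem.List.pyGet?, PySem.List.pyIdx?]
  split_ifs <;> simp_all

lemma pv_getD2 (l : List Char) : PySem.List.pyGetD l (2:Int) ' ' = l[2]?.getD ' ' := by
  simp only [PySem.List.pyGetD, PySem.List.pyGet?, PySem.List.pyIdx?]
  split_ifs <;> simp_all

-- ===== VERDICT (by name: the statement is the Claim_ definition above) =====
set_option maxRecDepth 8000 in
theorem determine_direction_spec : Claim_equal_determine_direction := by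
  intro pe ornt _ hpre
  obtain ⟨hne, hmem, hlt, hmem2⟩ := hpre
  unfold Spec_determine_direction determine_direction determine_direction_alt
  cases hl : pe.toList with
  | nil => exact absurd hl hne
  | cons c rest =>
  rw [hl] at hmem hmem2
  simp only [List.headD_cons] at hmem hmem2
  simp only [List.mem_cons, List.not_mem_nil, or_false] at hmem
  generalize hb : (PySem.Str.slice pe (some 1) none == "-") = b
  rcases hmem with rfl | rfl | rfl
  · have hdA : (PySem.Dict.ofList [("i",(0:Int)),("j",1),("k",2)]).getD (String.ofList ['i']) 0 = 0 := by decide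
    have hd1 : pvIdx.getD (String.ofList ['i']) 0 = 0 := by decide
    rw [show pvAxIdx 'i' = 0 from by decide] at hmem2
    norm_num at hmem2
    simp only [PySem.List.pyGetD_zero_cons, hdA, hd1, pv_getD0]
    revert hmem2
    generalize ornt.toList[0]?.getD ' ' = a
    intro hmem2
    rcases hmem2 with rfl|rfl|rfl|rfl|rfl|rfl <;> cases b <;> decide
  · have hdA : (PySem.Dict.ofList [("i",(0:Int)),("j",1),("k",2)]).getD (String.ofList ['j']) 0 = 1 := by decide
    have hd1 : pvIdx.getD (String.ofList ['j']) 0 = 1 := by decide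
    rw [show pvAxIdx 'j' = 1 from by decide] at hmem2
    norm_num at hmem2
    simp only [PySem.List.pyGetD_zero_cons, hdA, hd1, pv_getD1]
    revert hmem2
    generalize ornt.toList[1]?.getD ' ' = a
    intro hmem2
    rcases hmem2 with rfl|rfl|rfl|rfl|rfl|rfl <;> cases b <;> decide
  · have hdA : (PySem.Dict.ofList [("i",(0:Int)),("j",1),("k",2)]).getD (String.ofList ['k']) 0 = 2 := by decide
    have hd1 : pvIdx.getD (String.ofList ['k']) 0 = 2 := by decide
    rw [show pvAxIdx 'k' = 2 from by decide] at hmem2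
    norm_num at hmem2
    simp only [PySem.List.pyGetD_zero_cons, hdA, hd1, pv_getD2]
    revert hmem2
    generalize ornt.toList[2]?.getD ' ' = a
    intro hmem2
    rcases hmem2 with rfl|rfl|rfl|rfl|rfl|rfl <;> cases b <;> decide
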